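-- pv_equiv track=rewrite | github.com/blzzua/codewars | 6-kyu/simple_fun_135_missing_alphabets.py | missing_alphabets
-- ===== SOURCE A (Python) =====
-- al = 'abcdefghijklmnopqrstuvwxyz'
--
-- def missing_alphabets(st):
--     st = list(st)
--     res = []
--     while st:
--         letter = st.pop(0)
--         if letter not in res:
--             res = res + list(al)
--         res.pop(res.index(letter))
--     return ''.join(sorted(res))
-- ===== SOURCE B (Python) =====
-- al = 'abcdefghijklmnopqrstuvwxyz'
--
-- def missing_alphabets(st):
--     counts = [0] * 26
--     for ch in st:
--         counts[al.index(ch)] += 1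
--     k = max(counts)
--     return ''.join(c * (k - counts[i]) for i, c in enumerate(al))
-- ===== Notes on version B (the rewrite author's own statement) =====
-- stated objective: faster
-- what changed: Replaces A's quadratic list bookkeeping (membership scans, list.index and pop on an ever-growing list, plus a final sort) by one pass over 26 per-letter counters indexed by al.index(ch), taking the maximum count k and emitting each letter (k - count) times in alphabet order.
import Mathlib
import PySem

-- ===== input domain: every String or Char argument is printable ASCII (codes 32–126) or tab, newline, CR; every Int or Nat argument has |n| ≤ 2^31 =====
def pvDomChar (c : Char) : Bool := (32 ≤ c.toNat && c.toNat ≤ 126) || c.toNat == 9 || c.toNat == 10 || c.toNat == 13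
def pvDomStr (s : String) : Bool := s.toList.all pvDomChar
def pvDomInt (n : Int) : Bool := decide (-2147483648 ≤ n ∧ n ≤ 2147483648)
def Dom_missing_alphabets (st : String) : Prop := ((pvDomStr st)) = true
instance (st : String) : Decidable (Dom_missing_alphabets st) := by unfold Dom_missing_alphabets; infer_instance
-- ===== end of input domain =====

-- B replaces A's quadratic list bookkeeping (membership scans, index/pop on a growing list, final sort)
-- by one counting pass, the maximum count k, and emitting each letter (k - count) times in alphabet order (objective: faster).

-- ===== PORT A =====
-- the module constant al = 'abcdefghijklmnopqrstuvwxyz' (shared by both Pythons)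
def pvAl : List Char := "abcdefghijklmnopqrstuvwxyz".toList

-- res.pop(res.index(letter)) — returns res unchanged where Python raises ValueError (excluded by Pre_)
def pvRemoveAt (res : List Char) (x : Char) : List Char :=
  match PySem.List.index? res x with
  | some i =>
      match PySem.List.pop? res (i : Int) with
      | some p => p.2
      | none => res
  | none => res

-- the while-loop: pop st's head, maybe extend res by the alphabet, remove the letter
def pvLoopA : List Char → List Char → List Char
  | [], res => res
  | letter :: rest, res =>
      let res1 := if letter ∈ res then res else res ++ pvAl
      pvLoopA rest (pvRemoveAt res1 letter)

def missing_alphabets (st : String) : String :=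
  String.ofList (PySem.List.sorted (pvLoopA st.toList []) (fun c => c) false)

-- ===== PORT B =====
def missing_alphabets_alt (st : String) : String :=
  let counts0 : List Int := List.replicate 26 0
  let counts := st.toList.foldl (fun counts ch =>
      match PySem.List.index? pvAl ch with
      | some i => PySem.List.pySetD counts (i : Int) (PySem.List.pyGetD counts (i : Int) 0 + 1)
      | none => counts) counts0      -- Python raises ValueError here (al.index); excluded by Pre_
  let k : Int :=
      match PySem.List.max? counts (fun v => v) with
      | some m => m
      | none => 0                    -- unreachable: counts always has 26 entries
  String.ofList ((PySem.List.enumerate pvAl).flatMap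
    (fun p => PySem.List.pyRepeat [p.2] (k - PySem.List.pyGetD counts p.1 0)))

-- ===== PRECONDITION & SPEC =====
-- Pre_ excludes exactly the inputs containing a character that is not a lowercase ASCII letter;
-- on those A raises ValueError (res.index(letter) for a letter that is never added to res).
def Pre_missing_alphabets (st : String) : Prop :=
  (st.toList.all (fun c => "abcdefghijklmnopqrstuvwxyz".toList.contains c)) = true
instance (st : String) : Decidable (Pre_missing_alphabets st) := by
  unfold Pre_missing_alphabets; infer_instance
def pvWitness_missing_alphabets : String := "banana"

def Spec_missing_alphabets (st : String) (out : String) : Prop := out = missing_alphabets_alt st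
instance (st : String) (out : String) : Decidable (Spec_missing_alphabets st out) := by
  unfold Spec_missing_alphabets; infer_instance

-- ===== CLAIM (what is proved, stated in full; the proofs are below) =====
def Claim_equal_missing_alphabets : Prop :=
  ∀ (st : String), Dom_missing_alphabets st → Pre_missing_alphabets st →
    Spec_missing_alphabets st (missing_alphabets st)

-- ===== LEMMAS AND PROOFS =====

-- the counter abstraction of A's loop: k = how many alphabets have been appended so far,
-- g c = how many occurrences of c have been consumed so far
def pvStep : List Char → Nat → (Char → Nat) → Nat
  | [], k, _ => k
  | x :: rest, k, g =>
      pvStep rest (if g x = k then k + 1 else k) (fun c => if c = x then g c + 1 else g c)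

theorem pvAl_nodup : pvAl.Nodup := by decide

theorem pvAl_sorted : pvAl.Pairwise (· < ·) := by decide

theorem pvRemoveAt_eq_erase (res : List Char) (x : Char) (h : x ∈ res) :
    pvRemoveAt res x = res.erase x := by
  induction res with
  | nil => cases h
  | cons a t ih =>
    by_cases hax : a = x
    · subst hax
      simp only [pvRemoveAt, PySem.List.index?_cons_self a t, Nat.cast_zero,
        PySem.List.pop?_zero_cons]
      simp
    · have hxt : x ∈ t := by
        cases h with
        | head => exact absurd rfl hax
        | tail _ h => exact h
      obtain ⟨j, hj⟩ := Option.isSome_iff_exists.mp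
        ((PySem.List.index?_isSome_iff t x).mpr hxt)
      obtain ⟨hjlt, hget, -⟩ := PySem.List.getElem_of_index?_eq_some hj
      have hcons : PySem.List.index? (a :: t) x = some (j + 1) := by
        rw [PySem.List.index?_cons_of_ne t hax, hj]; rfl
      have hlt : j + 1 < (a :: t).length := by simpa using Nat.succ_lt_succ hjlt
      have iht := ih hxt
      simp only [pvRemoveAt, hj, PySem.List.pop?_natCast t j hjlt] at iht
      simp only [pvRemoveAt, hcons, PySem.List.pop?_natCast (a :: t) (j + 1) hlt]
      simp only [List.eraseIdx_cons_succ]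
      rw [List.erase_cons_tail (by simpa using hax)]
      simpa using iht

theorem pvStep_g_le (x : Char) (k : Nat) (g : Char → Nat) (hg : ∀ c, g c ≤ k) :
    ∀ c, (fun c => if c = x then g c + 1 else g c) c ≤ if g x = k then k + 1 else k := by
  intro c
  by_cases hc : c = x
  · subst hc; have := hg c; dsimp only; rw [if_pos rfl]; split_ifs <;> omega
  · have := hg c; dsimp only; rw [if_neg hc]; split_ifs <;> omega

theorem pvStep_le (st : List Char) : ∀ (k : Nat) (g : Char → Nat), (∀ c, g c ≤ k) →
    ∀ c, g c + st.count c ≤ pvStep st k g := by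
  induction st with
  | nil => intro k g hg c; simpa using hg c
  | cons x rest ih =>
    intro k g hg c
    have hih := ih _ _ (pvStep_g_le x k g hg) c
    simp only [pvStep, List.count_cons, beq_iff_eq]
    by_cases hc : c = x
    · subst hc; rw [if_pos rfl] at hih; rw [if_pos rfl]; omega
    · rw [if_neg hc] at hih; rw [if_neg (fun e => hc e.symm)]; omega

theorem pvStep_exists (st : List Char) : ∀ (k : Nat) (g : Char → Nat), (∀ c, g c ≤ k) →
    (∃ c, g c = k) → ∃ c, g c + st.count c = pvStep st k g := by
  induction st with
  | nil => intro k g _ ⟨c, hc⟩; exact ⟨c, by simpa using hc⟩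
  | cons x rest ih =>
    intro k g hg ⟨w, hw⟩
    have hwit : ∃ c, (fun c => if c = x then g c + 1 else g c) c = if g x = k then k + 1 else k := by
      by_cases hk : g x = k
      · exact ⟨x, by simp [hk]⟩
      · have hwx : w ≠ x := fun e => hk (e ▸ hw)
        exact ⟨w, by simp [hwx, hw, hk]⟩
    obtain ⟨c', hc'⟩ := ih _ _ (pvStep_g_le x k g hg) hwit
    refine ⟨c', ?_⟩
    simp only [pvStep, List.count_cons, beq_iff_eq]
    by_cases hcx : c' = x
    · subst hcx; rw [if_pos rfl] at hc'; rw [if_pos rfl]; omega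
    · rw [if_neg hcx] at hc'; rw [if_neg (fun e => hcx e.symm)]; omega

theorem pvLoopA_count (st : List Char) : ∀ (res : List Char) (k : Nat) (g : Char → Nat),
    (∀ c ∈ st, c ∈ pvAl) → (∀ c, g c ≤ k) →
    (∀ c ∈ pvAl, res.count c = k - g c) → (∀ c, c ∉ pvAl → res.count c = 0) →
    ∀ c, (pvLoopA st res).count c =
      if c ∈ pvAl then pvStep st k g - (g c + st.count c) else 0 := by
  induction st with
  | nil =>
    intro res k g _ _ hin hout c
    simp only [pvLoopA, pvStep, List.count_nil]
    by_cases hc : c ∈ pvAl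
    · rw [if_pos hc, hin c hc]; omega
    · rw [if_neg hc]; exact hout c hc
  | cons x rest ih =>
    intro res k g hst hg hin hout
    have hx : x ∈ pvAl := hst x (List.mem_cons_self)
    have hst' : ∀ c ∈ rest, c ∈ pvAl := fun c hc => hst c (List.mem_cons_of_mem _ hc)
    have hal_count : ∀ c, pvAl.count c = if c ∈ pvAl then 1 else 0 := by
      intro c
      by_cases hc : c ∈ pvAl
      · rw [if_pos hc]; exact List.count_eq_one_of_mem (by decide) hc
      · rw [if_neg hc]; exact List.count_eq_zero.mpr hc
    by_cases hmem : x ∈ res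
    · -- letter already in res: no alphabet appended
      have hgx : g x < k := by
        have h1 := List.count_pos_iff.mpr hmem
        have h2 := hin x hx
        have h3 := hg x
        omega
      have hk : ¬ g x = k := by omega
      simp only [pvLoopA, if_pos hmem, pvRemoveAt_eq_erase res x hmem]
      have hih := ih (res.erase x) k (fun c => if c = x then g c + 1 else g c) hst'
        (by intro c; by_cases hcx : c = x
            · simp [hcx]; omega
            · simp [hcx]; exact hg c)
        (by intro c hc
            have h2 := hin c hc
            by_cases hcx : c = x
            · subst hcx
              simp [List.count_erase, h2]; omega
            · have hxc : ¬ x = c := fun e => hcx e.symm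
              simp [List.count_erase, hcx, hxc, h2])
        (by intro c hc
            have h2 := hout c hc
            simp [List.count_erase, h2])
      intro c
      rw [hih c]
      by_cases hc : c ∈ pvAl
      · rw [if_pos hc, if_pos hc]
        simp only [pvStep, if_neg hk]
        by_cases hcx : c = x
        · subst hcx; simp [List.count_cons]; omega
        · have hxc : ¬ x = c := fun e => hcx e.symm
          simp [List.count_cons, hcx, hxc]
      · rw [if_neg hc, if_neg hc]
    · -- letter not in res: alphabet appended, k bumps
      have hgx : g x = k := by
        have h2 := hin x hx
        have h1 := List.count_eq_zero.mpr hmem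
        have h3 := hg x
        omega
      have hmem1 : x ∈ res ++ pvAl := List.mem_append_right _ hx
      simp only [pvLoopA, if_neg hmem, pvRemoveAt_eq_erase _ x hmem1]
      have hih := ih ((res ++ pvAl).erase x) (k + 1) (fun c => if c = x then g c + 1 else g c)
        hst'
        (by intro c; have h1 := hg c; by_cases hcx : c = x <;> simp [hcx] <;> omega)
        (by intro c hc
            have h2 := hin c hc
            have h3 := hg c
            have h4 := hal_count c
            rw [if_pos hc] at h4
            by_cases hcx : c = x
            · subst hcx
              simp [List.count_erase, List.count_append, h2, h4]
              try omega
            · have hxc : ¬ x = c := fun e => hcx e.symm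
              simp [List.count_erase, List.count_append, hcx, hxc, h2, h4]
              omega)
        (by intro c hc
            have h2 := hout c hc
            have h4 := hal_count c
            rw [if_neg hc] at h4
            simp [List.count_erase, List.count_append, h2, h4])
      intro c
      rw [hih c]
      by_cases hc : c ∈ pvAl
      · rw [if_pos hc, if_pos hc]
        simp only [pvStep, if_pos hgx]
        by_cases hcx : c = x
        · subst hcx; simp [List.count_cons]; omega
        · have hxc : ¬ x = c := fun e => hcx e.symm
          simp [List.count_cons, hcx, hxc]
      · rw [if_neg hc, if_neg hc]

theorem count_flatMap_replicate (f : Char → Nat) (c : Char) :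
    ∀ (l : List Char), l.Nodup →
    (l.flatMap (fun a => List.replicate (f a) a)).count c = if c ∈ l then f c else 0 := by
  intro l
  induction l with
  | nil => simp
  | cons a t ih =>
    intro hnd
    rw [List.flatMap_cons, List.count_append, List.count_replicate,
      ih (List.Nodup.of_cons hnd)]
    have hat : a ∉ t := (List.nodup_cons.mp hnd).1
    by_cases hca : c = a
    · subst hca
      simp [hat]
    · have hac : ¬ a = c := fun e => hca e.symm
      simp [hca, hac]

theorem pairwise_flatMap_replicate (f : Char → Nat) :
    ∀ (l : List Char), l.Pairwise (· < ·) →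
    (l.flatMap (fun a => List.replicate (f a) a)).Pairwise (· ≤ ·) := by
  intro l
  induction l with
  | nil => simp
  | cons a t ih =>
    intro hp
    rw [List.flatMap_cons, List.pairwise_append]
    refine ⟨List.pairwise_replicate.mpr (Or.inr le_rfl), ih hp.of_cons, ?_⟩
    intro u hu v hv
    have hua : u = a := List.eq_of_mem_replicate hu
    obtain ⟨b, hb, hvb⟩ := List.mem_flatMap.mp hv
    have hvb' : v = b := List.eq_of_mem_replicate hvb
    rw [hua, hvb']
    exact le_of_lt ((List.pairwise_cons.mp hp).1 b hb)

-- B-side bookkeeping: the fold over the 26-entry counter list is a map over the alphabet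
theorem pvSet_map (l : List Char) (F : Char → Int) (ch : Char) (v : Int) (i : Nat)
    (hnd : l.Nodup) (hi : i < l.length) (hch : l[i] = ch) :
    (l.map F).set i v = l.map (fun c => if c = ch then v else F c) := by
  apply List.ext_getElem
  · simp
  · intro j h1 h2
    simp only [List.getElem_set, List.getElem_map] at h1 h2 ⊢
    have hjl : j < l.length := by simpa using h2
    by_cases hj : i = j
    · subst hj; rw [if_pos rfl, if_pos hch]
    · rw [if_neg hj, if_neg]
      intro he
      exact hj ((List.Nodup.getElem_inj_iff hnd).mp (by rw [hch, he])).symm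

theorem pvFold_counts : ∀ (l : List Char) (g : Char → Nat), (∀ c ∈ l, c ∈ pvAl) →
    l.foldl (fun counts ch =>
      match PySem.List.index? pvAl ch with
      | some i => PySem.List.pySetD counts (i : Int) (PySem.List.pyGetD counts (i : Int) 0 + 1)
      | none => counts) (pvAl.map (fun c => ((g c : Nat) : Int)))
    = pvAl.map (fun c => (((g c + l.count c : Nat)) : Int)) := by
  intro l
  induction l with
  | nil => intro g _; simp
  | cons ch rest ih =>
    intro g hl
    have hch : ch ∈ pvAl := hl ch List.mem_cons_self
    obtain ⟨i, hi⟩ := Option.isSome_iff_exists.mp ((PySem.List.index?_isSome_iff pvAl ch).mpr hch)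
    obtain ⟨hilt, hget, -⟩ := PySem.List.getElem_of_index?_eq_some hi
    rw [List.foldl_cons]
    simp only [hi]
    have hilt' : i < (pvAl.map (fun c => ((g c : Nat) : Int))).length := by simpa using hilt
    have hsetd : ∀ (xs : List Int) (v : Int), i < xs.length →
        PySem.List.pySetD xs (i : Int) v = xs.set i v := by
      intro xs v h
      simp [PySem.List.pySetD, PySem.List.pySet?, PySem.List.pyIdx?, h]
    have hgetd : PySem.List.pyGetD (pvAl.map (fun c => ((g c : Nat) : Int))) (i : Int) 0
        = ((g ch : Nat) : Int) := by
      rw [PySem.List.pyGetD_natCast, List.getD_eq_getElem _ _ hilt', List.getElem_map, hget]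
    rw [hgetd, hsetd _ _ hilt',
      pvSet_map pvAl _ ch _ i pvAl_nodup hilt hget]
    have hmapeq : pvAl.map (fun c => if c = ch then ((g ch : Nat) : Int) + 1 else ((g c : Nat) : Int))
        = pvAl.map (fun c => (((fun c => if c = ch then g c + 1 else g c) c : Nat) : Int)) := by
      apply List.map_congr_left
      intro c _
      by_cases hc : c = ch
      · subst hc; simp
      · simp [hc]
    rw [hmapeq, ih _ (fun c hc => hl c (List.mem_cons_of_mem _ hc))]
    apply List.map_congr_left
    intro c _
    by_cases hc : c = ch
    · subst hc; simp [List.count_cons]; omega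
    · have : ¬ ch = c := fun e => hc e.symm
      simp [List.count_cons, hc, this]

theorem pvFlatMap_congr {α β : Type} (l : List α) (f g : α → List β)
    (h : ∀ x ∈ l, f x = g x) : l.flatMap f = l.flatMap g := by
  induction l with
  | nil => rfl
  | cons a t ih =>
    rw [List.flatMap_cons, List.flatMap_cons, h a List.mem_cons_self,
      ih (fun x hx => h x (List.mem_cons_of_mem _ hx))]

theorem pvEnum_flatMap (H : Char → List Char) :
    ∀ (l : List Char) (s : Int),
    (PySem.List.enumerate l s).flatMap (fun p => H p.2) = l.flatMap H := by
  intro l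
  induction l with
  | nil => intro s; simp [PySem.List.enumerate_nil]
  | cons a t ih =>
    intro s
    rw [PySem.List.enumerate_cons, List.flatMap_cons, List.flatMap_cons, ih]

theorem pvGetD_map_enum (F : Char → Int) (p : Int × Char)
    (hp : p ∈ PySem.List.enumerate pvAl 0) :
    PySem.List.pyGetD (pvAl.map F) p.1 0 = F p.2 := by
  obtain ⟨k, hk, hpk⟩ := (PySem.List.mem_enumerate_iff _ _ _).mp hp
  subst hpk
  simp only [zero_add]
  rw [show ((k : Int)) = ((k : Nat) : Int) from rfl, PySem.List.pyGetD_natCast,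
    List.getD_eq_getElem _ _ (by simpa using hk), List.getElem_map]

-- B's k (max of the 26 per-letter counts) equals A's alphabet-append count
theorem pvKB_eq (l : List Char) (hal : ∀ c ∈ l, c ∈ pvAl) :
    (match PySem.List.max? (pvAl.map (fun c => ((l.count c : Nat) : Int))) (fun v => v) with
     | some m => m
     | none => 0) = ((pvStep l 0 (fun _ => 0) : Nat) : Int) := by
  have hcnt_le : ∀ c, l.count c ≤ pvStep l 0 (fun _ => 0) := by
    intro c
    have := pvStep_le l 0 (fun _ => 0) (fun _ => le_rfl) c
    simpa using this
  have hwit : ∃ c ∈ pvAl, l.count c = pvStep l 0 (fun _ => 0) := by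
    by_cases h0 : pvStep l 0 (fun _ => 0) = 0
    · exact ⟨'a', by decide, by have := hcnt_le 'a'; omega⟩
    · obtain ⟨c0, hc0⟩ := pvStep_exists l 0 (fun _ => 0) (fun _ => le_rfl) ⟨'a', rfl⟩
      have hc0' : l.count c0 = pvStep l 0 (fun _ => 0) := by simpa using hc0
      have : c0 ∈ l := List.count_pos_iff.mp (by omega)
      exact ⟨c0, hal c0 this, hc0'⟩
  obtain ⟨c0, hc0al, hc0⟩ := hwit
  have hKmem : ((pvStep l 0 (fun _ => 0) : Nat) : Int)
      ∈ pvAl.map (fun c => ((l.count c : Nat) : Int)) :=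
    List.mem_map.mpr ⟨c0, hc0al, by rw [hc0]⟩
  cases hmax : PySem.List.max? (pvAl.map (fun c => ((l.count c : Nat) : Int))) (fun v => v) with
  | none =>
    rw [PySem.List.max?_eq_none_iff] at hmax
    rw [hmax] at hKmem
    cases hKmem
  | some m =>
    simp only
    obtain ⟨c1, -, hm⟩ := List.mem_map.mp (PySem.List.max?_mem hmax)
    have hle : m ≤ ((pvStep l 0 (fun _ => 0) : Nat) : Int) := by
      rw [← hm]
      exact_mod_cast hcnt_le c1
    exact le_antisymm hle (PySem.List.max?_isMax hmax _ hKmem)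

theorem missing_alphabets_main (st : String) (hpre : Pre_missing_alphabets st) :
    missing_alphabets st = missing_alphabets_alt st := by
  have hal : ∀ c ∈ st.toList, c ∈ pvAl := by
    intro c hc
    exact List.mem_of_elem_eq_true (List.all_eq_true.mp hpre c hc)
  have hcount := pvLoopA_count st.toList [] 0 (fun _ => 0) hal (fun _ => le_rfl)
    (by intro c _; simp) (by intro c _; simp)
  have hcnt_le : ∀ c, st.toList.count c ≤ pvStep st.toList 0 (fun _ => 0) := by
    intro c
    have := pvStep_le st.toList 0 (fun _ => 0) (fun _ => le_rfl) c
    simpa using this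
  show String.ofList (PySem.List.sorted (pvLoopA st.toList []) (fun c => c) false) = _
  unfold missing_alphabets_alt
  dsimp only
  have hfold := pvFold_counts st.toList (fun _ => 0) hal
  simp only [Nat.cast_zero, Nat.zero_add] at hfold
  rw [show (List.replicate 26 (0 : Int)) = pvAl.map (fun c => (0 : Int)) from by decide]
  rw [hfold]
  rw [pvKB_eq st.toList hal]
  rw [pvFlatMap_congr _ _
      (fun p => PySem.List.pyRepeat [p.2]
        (((pvStep st.toList 0 (fun _ => 0) : Nat) : Int) - ((st.toList.count p.2 : Nat) : Int)))
      (fun p hp => by rw [pvGetD_map_enum _ p hp])]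
  rw [pvEnum_flatMap (fun c => PySem.List.pyRepeat [c]
      (((pvStep st.toList 0 (fun _ => 0) : Nat) : Int) - ((st.toList.count c : Nat) : Int))) pvAl 0]
  congr 1
  apply PySem.List.sorted_id_eq_of_perm_of_pairwise
  · -- the emitted list is a permutation of A's leftover list
    have htn : ∀ c, ((((pvStep st.toList 0 (fun _ => 0) : Nat) : Int)
        - ((st.toList.count c : Nat) : Int))).toNat
        = pvStep st.toList 0 (fun _ => 0) - st.toList.count c := by
      intro c; have := hcnt_le c; omega
    apply List.perm_iff_count.mpr
    intro c
    calc (pvAl.flatMap fun c => PySem.List.pyRepeat [c]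
            (((pvStep st.toList 0 (fun _ => 0) : Nat) : Int)
              - ((st.toList.count c : Nat) : Int))).count c
        = (pvAl.flatMap fun c => List.replicate
            (pvStep st.toList 0 (fun _ => 0) - st.toList.count c) c).count c := by
          simp only [PySem.List.pyRepeat_singleton, htn]
      _ = (pvLoopA st.toList []).count c := by
          rw [count_flatMap_replicate _ _ pvAl pvAl_nodup, hcount c]
          by_cases hc : c ∈ pvAl
          · rw [if_pos hc, if_pos hc]; simp
          · rw [if_neg hc, if_neg hc]
  · -- and it is ≤-sorted (alphabet order)
    rw [show (fun c => PySem.List.pyRepeat [c]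
          (((pvStep st.toList 0 (fun _ => 0) : Nat) : Int) - ((st.toList.count c : Nat) : Int)))
        = (fun c => List.replicate ((((pvStep st.toList 0 (fun _ => 0) : Nat) : Int)
            - ((st.toList.count c : Nat) : Int)).toNat) c) from
      funext (fun c => PySem.List.pyRepeat_singleton c _)]
    exact pairwise_flatMap_replicate _ pvAl pvAl_sorted

-- ===== VERDICT (by name: the statement is the Claim_ definition above) =====
theorem missing_alphabets_spec : Claim_equal_missing_alphabets := by
  intro st _ hpre
  exact missing_alphabets_main st hpre
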